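-- pv_equiv track=rewrite | github.com/drewpterry/random-programming-problems | productOfOtherNumbers.py | get_product_of_all_ints_except_at_index
-- ===== SOURCE A (Python) =====
-- def get_product_of_all_ints_except_at_index(array):
--     products = []
--     for index, each in enumerate(array):
--         product = 1
--         for index2, second in enumerate(array):
--             if index != index2:
--                 product *= second
--         products.append(product)
--     return products
-- ===== SOURCE B (Python) =====
-- def get_product_of_all_ints_except_at_index(array):
--     prefixes = []
--     p = 1
--     for x in array:
--         prefixes.append(p)
--         p *= x
--     suffixes = []
--     s = 1
--     for x in reversed(array):
--         suffixes.append(s)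
--         s *= x
--     suffixes.reverse()
--     return [a * b for a, b in zip(prefixes, suffixes)]
-- ===== Notes on version B (the rewrite author's own statement) =====
-- stated objective: faster
-- what changed: Replaced the nested enumerate loops (re-multiplying the whole array for every index) by one prefix-product pass and one suffix-product pass combined pairwise.
import Mathlib
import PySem

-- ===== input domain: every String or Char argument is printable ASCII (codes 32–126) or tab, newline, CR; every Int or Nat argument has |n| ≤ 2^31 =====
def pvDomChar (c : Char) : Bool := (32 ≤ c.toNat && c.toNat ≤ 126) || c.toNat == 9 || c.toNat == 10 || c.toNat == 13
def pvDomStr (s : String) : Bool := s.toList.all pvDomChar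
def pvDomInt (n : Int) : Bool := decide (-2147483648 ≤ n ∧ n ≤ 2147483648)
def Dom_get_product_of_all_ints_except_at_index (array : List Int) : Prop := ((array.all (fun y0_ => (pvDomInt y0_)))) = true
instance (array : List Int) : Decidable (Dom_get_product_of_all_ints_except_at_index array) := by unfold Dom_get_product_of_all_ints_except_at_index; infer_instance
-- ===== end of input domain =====

-- B replaces A's nested quadratic enumerate loops by one prefix-product pass and one
-- suffix-product pass combined pairwise (objective: faster, O(n) instead of O(n^2)).

-- ===== PORT A =====
def get_product_of_all_ints_except_at_index (array : List Int) : List Int :=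
  (PySem.List.enumerate array).foldl
    (fun products p =>
      products ++
        [(PySem.List.enumerate array).foldl
          (fun product q => if p.1 ≠ q.1 then product * q.2 else product) 1])
    []

-- ===== PORT B =====
-- the running-product 'append' loop of Source B (for both the prefixes and the suffixes pass)
def pvRunning (p : Int) : List Int → List Int
  | [] => []
  | x :: xs => p :: pvRunning (p * x) xs

def get_product_of_all_ints_except_at_index_alt (array : List Int) : List Int :=
  let prefixes := pvRunning 1 array
  let suffixes := (pvRunning 1 array.reverse).reverse
  (prefixes.zip suffixes).map (fun ab => ab.1 * ab.2)

-- ===== PRECONDITION & SPEC =====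
def Spec_get_product_of_all_ints_except_at_index (array : List Int) (out : List Int) : Prop := out = get_product_of_all_ints_except_at_index_alt array
instance (array : List Int) (out : List Int) : Decidable (Spec_get_product_of_all_ints_except_at_index array out) := by unfold Spec_get_product_of_all_ints_except_at_index; infer_instance

-- ===== CLAIM (what is proved, stated in full; the proofs are below) =====
def Claim_equal_get_product_of_all_ints_except_at_index : Prop := ∀ (array : List Int), Dom_get_product_of_all_ints_except_at_index array → Spec_get_product_of_all_ints_except_at_index array (get_product_of_all_ints_except_at_index array)

-- ===== LEMMAS AND PROOFS =====

-- B side: the prefixes pass lists the products of the first i elements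
theorem pvRunning_eq (xs : List Int) : ∀ (p : Int),
    pvRunning p xs = (List.range xs.length).map (fun i => p * (xs.take i).prod) := by
  induction xs with
  | nil => intro p; simp [pvRunning]
  | cons x xs ih =>
      intro p
      simp only [pvRunning, List.length_cons, List.range_succ_eq_map, List.map_cons,
        List.map_map, ih (p * x)]
      congr 1
      · simp
      · apply List.map_congr_left; intro i _; simp [mul_assoc]

theorem pvRunning_append (ys : List Int) : ∀ (p x : Int),
    pvRunning p (ys ++ [x]) = pvRunning p ys ++ [p * ys.prod] := by
  induction ys with
  | nil => intro p x; simp [pvRunning]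
  | cons y ys ih => intro p x; simp [pvRunning, ih, mul_assoc]

-- B side: the reversed suffixes pass lists the products of the elements after i
theorem pvSuff_eq (xs : List Int) :
    (pvRunning 1 xs.reverse).reverse
      = (List.range xs.length).map (fun i => (xs.drop (i + 1)).prod) := by
  induction xs with
  | nil => simp [pvRunning]
  | cons x xs ih =>
      simp only [List.reverse_cons, pvRunning_append, List.reverse_append, List.reverse_cons,
        List.reverse_nil, List.nil_append, List.singleton_append, ih, List.length_cons,
        List.range_succ_eq_map, List.map_cons, List.map_map]
      congr 1
      simp

theorem alt_eq (xs : List Int) :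
    get_product_of_all_ints_except_at_index_alt xs
      = (List.range xs.length).map
          (fun i => (1 * (xs.take i).prod) * (xs.drop (i + 1)).prod) := by
  unfold get_product_of_all_ints_except_at_index_alt
  rw [pvSuff_eq, pvRunning_eq]
  dsimp only
  rw [List.zip_map', List.map_map]
  rfl

-- A side: the outer append-loop is a map over the enumerated indices
theorem foldl_append_map {α : Type} (l : List α) (f : α → Int) : ∀ (acc : List Int),
    l.foldl (fun acc a => acc ++ [f a]) acc = acc ++ l.map f := by
  induction l with
  | nil => intro acc; simp
  | cons x xs ih => intro acc; simp [ih]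

-- A's inner loop when the skipped index lies strictly before the enumeration window
theorem innerA (xs : List Int) : ∀ (s i acc : Int), i < s →
    (PySem.List.enumerate xs s).foldl
        (fun product q => if i ≠ q.1 then product * q.2 else product) acc
      = acc * xs.prod := by
  induction xs with
  | nil => intro s i acc _; simp [PySem.List.enumerate_nil]
  | cons x xs ih =>
      intro s i acc h
      rw [PySem.List.enumerate_cons, List.foldl_cons]
      have hne : i ≠ s := by omega
      simp only [hne, if_pos, ne_eq, not_false_iff]
      rw [ih (s + 1) i (acc * x) (by omega), List.prod_cons, mul_assoc]

-- A's inner loop in general: it multiplies everything except the element at index i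
theorem innerB (xs : List Int) : ∀ (s i acc : Int), s ≤ i →
    (PySem.List.enumerate xs s).foldl
        (fun product q => if i ≠ q.1 then product * q.2 else product) acc
      = acc * (xs.take (i - s).toNat).prod * (xs.drop ((i - s).toNat + 1)).prod := by
  induction xs with
  | nil => intro s i acc _; simp [PySem.List.enumerate_nil]
  | cons x xs ih =>
      intro s i acc h
      rw [PySem.List.enumerate_cons, List.foldl_cons]
      by_cases he : i = s
      · subst he
        simp only [ne_eq, not_true_eq_false, if_false]
        rw [innerA xs (i + 1) i acc (by omega)]
        simp
      · have hlt : s + 1 ≤ i := by omega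
        rw [show (if i ≠ ((s, x) : Int × Int).1 then acc * ((s, x) : Int × Int).2 else acc)
              = acc * x by simp [he]]
        rw [ih (s + 1) i (acc * x) hlt]
        obtain ⟨m, hm⟩ : ∃ m : Nat, i - s = (m : Int) + 1 :=
          ⟨(i - s - 1).toNat, by omega⟩
        have h1 : (i - s).toNat = m + 1 := by omega
        have h2 : (i - (s + 1)).toNat = m := by omega
        rw [h1, h2]
        simp [mul_assoc]

theorem a_eq (xs : List Int) :
    get_product_of_all_ints_except_at_index xs
      = (List.range xs.length).map
          (fun k => 1 * (xs.take k).prod * (xs.drop (k + 1)).prod) := by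
  unfold get_product_of_all_ints_except_at_index
  rw [foldl_append_map]
  have h1 : (PySem.List.enumerate xs 0).map
      (fun p => (PySem.List.enumerate xs 0).foldl
        (fun product q => if p.1 ≠ q.1 then product * q.2 else product) 1)
      = ((PySem.List.enumerate xs 0).map (·.1)).map
        (fun i => (PySem.List.enumerate xs 0).foldl
          (fun product q => if i ≠ q.1 then product * q.2 else product) 1) := by
    rw [List.map_map]; rfl
  rw [List.nil_append, h1, PySem.List.map_fst_enumerate, zero_add,
    PySem.List.pyRange_one, List.map_map]
  have hn : ((xs.length : Int) - 0).toNat = xs.length := by omega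
  rw [hn]
  apply List.map_congr_left
  intro k _
  simp only [Function.comp, zero_add]
  rw [innerB xs 0 (k : Int) 1 (by omega)]
  have h3 : ((k : Int) - 0).toNat = k := by omega
  rw [h3]

-- ===== VERDICT (by name: the statement is the Claim_ definition above) =====
theorem get_product_of_all_ints_except_at_index_spec : Claim_equal_get_product_of_all_ints_except_at_index := by
  intro array _
  unfold Spec_get_product_of_all_ints_except_at_index
  rw [a_eq, alt_eq]
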